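-- pv_equiv track=rewrite | github.com/dyshko/hackerrank | Week of Code 38/P (2).py | minuteToWinIt
-- ===== SOURCE A (Python) =====
-- def minuteToWinIt(a, k):
--     # Return the minimum amount of time in minutes.
--     for i in range(len(a)):
--         a[i]-=k*i
--
--     hist = {}
--     for x in a:
--         if x not in hist:
--             hist[x]=0
--         hist[x]+=1
--
--     return len(a) - max(hist.values())
-- ===== SOURCE B (Python) =====
-- def minuteToWinIt(a, k):
--     # Return the minimum amount of time in minutes.
--     # Same in-place normalisation as A; then mode via sort + run-length scan
--     # instead of a hash histogram.
--     for i in range(len(a)):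
--         a[i] -= k*i
--     c = sorted(a)
--     runs = []
--     last = 0
--     cur = 0
--     for x in c:
--         if cur and x == last:
--             cur += 1
--         else:
--             if cur:
--                 runs.append(cur)
--             last = x
--             cur = 1
--     if cur:
--         runs.append(cur)
--     return len(a) - max(runs)
-- ===== Notes on version B (the rewrite author's own statement) =====
-- stated objective: alternative
-- what changed: B finds the most frequent normalised value by sorting a copy and scanning it once for maximal-run lengths, instead of A's hash histogram.
import Mathlib
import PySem

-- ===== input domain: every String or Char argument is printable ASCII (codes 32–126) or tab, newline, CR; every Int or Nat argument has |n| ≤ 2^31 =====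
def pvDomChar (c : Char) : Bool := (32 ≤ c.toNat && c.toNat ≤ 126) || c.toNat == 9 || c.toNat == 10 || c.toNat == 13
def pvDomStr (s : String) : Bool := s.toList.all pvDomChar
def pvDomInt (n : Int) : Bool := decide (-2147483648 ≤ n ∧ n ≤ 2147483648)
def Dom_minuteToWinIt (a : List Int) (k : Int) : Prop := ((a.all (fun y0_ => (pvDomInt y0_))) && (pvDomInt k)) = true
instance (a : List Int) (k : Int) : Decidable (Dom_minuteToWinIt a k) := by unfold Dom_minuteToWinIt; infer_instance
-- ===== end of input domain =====

-- B replaces A's hash-histogram mode computation by sorting a copy and scanning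
-- maximal runs of equal values (objective: alternative algorithm, same result).
-- Both Pythons mutate `a` in place identically; equivalence here is about the return value.

-- ===== PORT A =====
-- one iteration of A's histogram loop: 'if x not in hist: hist[x] = 0' then 'hist[x] += 1'
def aStep (d : PySem.Dict Int Int) (x : Int) : PySem.Dict Int Int :=
  let d1 := if d.contains x then d else d.insert x 0
  d1.insert x (d1.getD x 0 + 1)

def minuteToWinIt (a : List Int) (k : Int) : Int :=
  -- for i in range(len(a)): a[i] -= k*i
  let a' := (PySem.List.enumerate a).map (fun p => p.2 - k * p.1)
  let hist := a'.foldl aStep PySem.Dict.empty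
  -- max() of the values; raises ValueError on empty a (excluded by Pre_)
  (a.length : Int) - (PySem.List.max? hist.values (fun v => v)).getD 0

-- ===== PORT B =====
-- one iteration of B's run-length scan over the sorted copy
def bStep (st : List Int × Int × Int) (x : Int) : List Int × Int × Int :=
  if st.2.2 ≠ 0 ∧ x = st.2.1 then (st.1, st.2.1, st.2.2 + 1)
  else ((if st.2.2 ≠ 0 then st.1 ++ [st.2.2] else st.1), x, (1 : Int))

def minuteToWinIt_alt (a : List Int) (k : Int) : Int :=
  -- for i in range(len(a)): a[i] -= k*i
  let a' := (PySem.List.enumerate a).map (fun p => p.2 - k * p.1)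
  let c := PySem.List.sorted a' (fun v => v) false
  let st := c.foldl bStep ([], 0, 0)
  let runs := if st.2.2 ≠ 0 then st.1 ++ [st.2.2] else st.1
  -- max() of the run lengths; raises ValueError on empty a (excluded by Pre_)
  (a.length : Int) - (PySem.List.max? runs (fun v => v)).getD 0

-- ===== PRECONDITION & SPEC =====
-- Pre_ excludes only the empty list, on which A's max() raises ValueError (B raises there too).
def Pre_minuteToWinIt (a : List Int) (k : Int) : Prop := a ≠ []
instance (a : List Int) (k : Int) : Decidable (Pre_minuteToWinIt a k) := by unfold Pre_minuteToWinIt; infer_instance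
def pvWitness_minuteToWinIt : List Int × Int := ([3, 1, 2], 1)

def Spec_minuteToWinIt (a : List Int) (k : Int) (out : Int) : Prop := out = minuteToWinIt_alt a k
instance (a : List Int) (k : Int) (out : Int) : Decidable (Spec_minuteToWinIt a k out) := by unfold Spec_minuteToWinIt; infer_instance

-- ===== CLAIM (what is proved, stated in full; the proofs are below) =====
def Claim_equal_minuteToWinIt : Prop := ∀ (a : List Int) (k : Int), Dom_minuteToWinIt a k → Pre_minuteToWinIt a k → Spec_minuteToWinIt a k (minuteToWinIt a k)

-- ===== LEMMAS AND PROOFS =====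

-- A's histogram step is exactly the Counter step.
theorem aStep_eq_modify (d : PySem.Dict Int Int) (x : Int) :
    aStep d x = d.modify x 0 (· + 1) := by
  by_cases h : d.contains x
  · simp [aStep, h, PySem.Dict.modify]
  · have hg : d.getD x 0 = 0 := PySem.Dict.getD_of_not_contains d 0 (by simpa using h)
    simp only [aStep, h, Bool.false_eq_true, if_false]
    rw [PySem.Dict.getD_insert_self, PySem.Dict.insert_insert_self, PySem.Dict.modify, hg]

theorem hist_eq_counter (b : List Int) :
    b.foldl aStep PySem.Dict.empty = PySem.Dict.counter b := by
  rw [PySem.Dict.counter_eq_foldl]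
  exact congrFun (congrFun (congrArg _ (funext fun d => funext fun x => aStep_eq_modify d x)) _) _

-- the run-lengths recorder the B fold produces on a sorted list, as a recursive spec
def Rspec (last cur : Int) (c : List Int) : List Int :=
  match h : c.dropWhile (· == last) with
  | [] => [cur + ((c.takeWhile (· == last)).length : Int)]
  | y :: t' => (cur + ((c.takeWhile (· == last)).length : Int)) :: Rspec y 1 t'
termination_by c.length
decreasing_by
  have := List.length_dropWhile_le (· == last) c
  rw [h] at this; simp at this; omega

theorem dropWhile_head_false {p : Int → Bool} : ∀ (l : List Int) (y : Int) (t : List Int),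
    l.dropWhile p = y :: t → p y = false := by
  intro l
  induction l with
  | nil => intro y t h; simp at h
  | cons z zs ih =>
    intro y t h
    by_cases hz : p z = true
    · rw [List.dropWhile_cons, if_pos hz] at h; exact ih y t h
    · rw [List.dropWhile_cons, if_neg hz] at h
      cases h; simpa using hz

theorem foldl_bStep_run (c : List Int) (runs : List Int) (last cur : Int) (h : 1 ≤ cur) :
    c.foldl bStep (runs, last, cur)
      = (c.dropWhile (· == last)).foldl bStep
          (runs, last, cur + ((c.takeWhile (· == last)).length : Int)) := by
  induction c generalizing cur with
  | nil => simp
  | cons x t ih =>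
    by_cases hx : (x == last) = true
    · have hxe : x = last := by simpa using hx
      simp only [List.dropWhile_cons, List.takeWhile_cons, hx, if_true]
      have hstep : bStep (runs, last, cur) x = (runs, last, cur + 1) := by
        simp [bStep, hxe, show cur ≠ 0 by omega]
      have harg : cur + (((x :: t.takeWhile (fun z => z == last)).length : Nat) : Int)
           = (cur + 1) + ((t.takeWhile (fun z => z == last)).length : Int) := by
        rw [List.length_cons]; omega
      rw [harg, List.foldl_cons, hstep]
      exact ih (cur + 1) (by omega)
    · simp only [List.dropWhile_cons, List.takeWhile_cons, hx, if_false]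
      simp

theorem foldl_bStep_spec (n : Nat) : ∀ (c : List Int), c.length ≤ n →
    ∀ (runs : List Int) (last cur : Int), 1 ≤ cur →
    (let st := c.foldl bStep (runs, last, cur)
     if st.2.2 ≠ 0 then st.1 ++ [st.2.2] else st.1) = runs ++ Rspec last cur c := by
  induction n with
  | zero =>
    intro c hc runs last cur hcur
    have : c = [] := List.eq_nil_of_length_eq_zero (Nat.le_zero.mp hc)
    subst this
    rw [Rspec]
    simp
    omega
  | succ n ih =>
    intro c hc runs last cur hcur
    rw [foldl_bStep_run c runs last cur hcur, Rspec]
    have hlen : ((c.takeWhile (· == last)).length : Int) ≥ 0 := by positivity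
    cases e : c.dropWhile (· == last) with
    | nil =>
      simp only [List.foldl_nil]
      have : cur + ((c.takeWhile (· == last)).length : Int) ≠ 0 := by omega
      simp [this]
    | cons y t' =>
      have hy := dropWhile_head_false _ _ _ e
      have hyne : y ≠ last := by simpa using hy
      have hcur' : cur + ((c.takeWhile (· == last)).length : Int) ≠ 0 := by omega
      have hstep : bStep (runs, last, cur + ((c.takeWhile (· == last)).length : Int)) y
          = (runs ++ [cur + ((c.takeWhile (· == last)).length : Int)], y, (1 : Int)) := by
        simp [bStep, hyne, hcur']
      have ht' : t'.length ≤ n := by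
        have h1 := List.length_dropWhile_le (fun z => z == last) c
        rw [e] at h1; simp only [List.length_cons] at h1; omega
      rw [List.foldl_cons, hstep]
      have := ih t' ht' (runs ++ [cur + ((c.takeWhile (· == last)).length : Int)]) y 1 le_rfl
      simp only [this]
      simp

theorem Rspec_mem (n : Nat) : ∀ (c : List Int), c.length ≤ n → ∀ (x : Int),
    (x :: c).Pairwise (· ≤ ·) →
    (∀ r ∈ Rspec x 1 c, ∃ v, v ∈ x :: c ∧ r = (((x :: c).count v : Nat) : Int)) ∧
    (∀ v ∈ x :: c, (((x :: c).count v : Nat) : Int) ∈ Rspec x 1 c) := by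
  induction n with
  | zero =>
    intro c hc x hp
    have : c = [] := List.eq_nil_of_length_eq_zero (Nat.le_zero.mp hc)
    subst this
    rw [Rspec]
    constructor
    · intro r hr
      simp at hr
      exact ⟨x, by simp, by simp [hr]⟩
    · intro v hv
      simp at hv
      simp [hv]
  | succ n ih =>
    intro c hc x hp
    have hxle : ∀ z ∈ c, x ≤ z := by
      intro z hz; exact (List.pairwise_cons.mp hp).1 z hz
    have hpc : c.Pairwise (· ≤ ·) := (List.pairwise_cons.mp hp).2
    have ht1 : ∀ z ∈ c.takeWhile (· == x), z = x := by
      intro z hz; simpa using List.mem_takeWhile_imp hz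
    have hsplit : c.takeWhile (· == x) ++ c.dropWhile (· == x) = c :=
      List.takeWhile_append_dropWhile
    have hcount_t1 : (c.takeWhile (· == x)).count x = (c.takeWhile (· == x)).length := by
      rw [List.count_eq_length]
      intro b hb; exact (ht1 b hb).symm
    -- every element of the drop part is ≠ x (strictly greater)
    have hdrop_gt : ∀ z ∈ c.dropWhile (· == x), x < z := by
      cases e : c.dropWhile (· == x) with
      | nil => intro z hz; simp at hz
      | cons y t' =>
        have hy := dropWhile_head_false _ _ _ e
        have hymem : y ∈ c := by
          have : y ∈ c.dropWhile (· == x) := by rw [e]; exact List.mem_cons_self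
          exact (List.dropWhile_sublist _).mem this
        have hyx : ¬ (y = x) := by simpa using hy
        have hxy : x < y := lt_of_le_of_ne (hxle y hymem) (Ne.symm hyx)
        have hpd : (c.dropWhile (· == x)).Pairwise (· ≤ ·) :=
          List.Pairwise.sublist (List.dropWhile_sublist _) hpc
        rw [e] at hpd
        intro z hz
        rcases List.mem_cons.mp hz with rfl | hz'
        · exact hxy
        · exact lt_of_lt_of_le hxy ((List.pairwise_cons.mp hpd).1 z hz')
    have hcount_x : (x :: c).count x = 1 + (c.takeWhile (· == x)).length := by
      have h0 : (c.dropWhile (· == x)).count x = 0 := by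
        rw [List.count_eq_zero]
        intro h; exact absurd rfl (ne_of_gt (hdrop_gt x h))
      have hxc : List.count x c = (c.takeWhile (· == x)).length := by
        conv_lhs => rw [← hsplit]
        rw [List.count_append, hcount_t1, h0]
        omega
      rw [List.count_cons_self, hxc]
      omega
    have hcount_drop : ∀ v ∈ c.dropWhile (· == x), (x :: c).count v = (c.dropWhile (· == x)).count v := by
      intro v hv
      have hvx : v ≠ x := (hdrop_gt v hv).ne'
      have h1 : (c.takeWhile (· == x)).count v = 0 := by
        rw [List.count_eq_zero]
        intro h; exact hvx (ht1 v h)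
      have hvc2 : List.count v c = List.count v (c.dropWhile (· == x)) := by
        conv_lhs => rw [← hsplit]
        rw [List.count_append, h1]
        omega
      rw [List.count_cons_of_ne (Ne.symm hvx), hvc2]
    rw [Rspec]
    cases e : c.dropWhile (· == x) with
    | nil =>
      have hct1 : c = c.takeWhile (· == x) := by
        conv_lhs => rw [← hsplit, e, List.append_nil]
      constructor
      · intro r hr
        simp only [List.mem_singleton] at hr
        exact ⟨x, List.mem_cons_self, by rw [hr, hcount_x]; omega⟩
      · intro v hv
        have hvx : v = x := by
          rcases List.mem_cons.mp hv with rfl | hv'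
          · rfl
          · exact ht1 v (hct1 ▸ hv')
        subst hvx
        rw [hcount_x]
        simp only [List.mem_singleton]
        omega
    | cons y t' =>
      have hpd : (c.dropWhile (· == x)).Pairwise (· ≤ ·) :=
        List.Pairwise.sublist (List.dropWhile_sublist _) hpc
      rw [e] at hpd
      have ht'len : t'.length ≤ n := by
        have h1 := List.length_dropWhile_le (fun z => z == x) c
        rw [e] at h1; simp only [List.length_cons] at h1; omega
      obtain ⟨ihM1, ihM2⟩ := ih t' ht'len y hpd
      have hsubc : ∀ v ∈ y :: t', v ∈ c := by
        intro v hv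
        exact (List.dropWhile_sublist (· == x)).mem (e ▸ hv)
      constructor
      · intro r hr
        rcases List.mem_cons.mp hr with rfl | hr'
        · exact ⟨x, List.mem_cons_self, by rw [hcount_x]; omega⟩
        · obtain ⟨v, hv, hveq⟩ := ihM1 r hr'
          refine ⟨v, List.mem_cons_of_mem _ (hsubc v hv), ?_⟩
          rw [hveq, hcount_drop v (e ▸ hv), e]
      · intro v hv
        by_cases hvx : v = x
        · subst hvx
          rw [hcount_x]
          refine List.mem_cons.mpr (Or.inl ?_)
          omega
        · have hvc : v ∈ c := by
            rcases List.mem_cons.mp hv with rfl | hv'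
            · exact absurd rfl hvx
            · exact hv'
          have hvdrop : v ∈ c.dropWhile (· == x) := by
            rcases (by rw [← hsplit] at hvc; exact List.mem_append.mp hvc) with h1 | h2
            · exact absurd (ht1 v h1) hvx
            · exact h2
          have := ihM2 v (e ▸ hvdrop)
          rw [hcount_drop v hvdrop, e]
          exact List.mem_cons_of_mem _ this
-- maxima of two nonempty lists with the same members agree
theorem maxD_eq_of_mutual (l1 l2 : List Int) (h1 : l1 ≠ []) (h2 : l2 ≠ [])
    (s1 : ∀ x ∈ l1, x ∈ l2) (s2 : ∀ x ∈ l2, x ∈ l1) :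
    (PySem.List.max? l1 (fun v => v)).getD 0 = (PySem.List.max? l2 (fun v => v)).getD 0 := by
  cases e1 : PySem.List.max? l1 (fun v => v) with
  | none => exact absurd ((PySem.List.max?_eq_none_iff l1 _).mp e1) h1
  | some m1 =>
    cases e2 : PySem.List.max? l2 (fun v => v) with
    | none => exact absurd ((PySem.List.max?_eq_none_iff l2 _).mp e2) h2
    | some m2 =>
      simp only [Option.getD_some]
      have hm1 : m1 ∈ l1 := PySem.List.max?_mem e1
      have hm2 : m2 ∈ l2 := PySem.List.max?_mem e2
      exact le_antisymm (PySem.List.max?_isMax e2 m1 (s1 m1 hm1))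
        (PySem.List.max?_isMax e1 m2 (s2 m2 hm2))

-- the central fact: histogram maximum = maximum run length of the sorted copy
theorem max_values_eq_max_runs (b : List Int) (hb : b ≠ []) :
    (PySem.List.max? (b.foldl aStep PySem.Dict.empty).values (fun v => v)).getD 0
      = (PySem.List.max?
          (let st := (PySem.List.sorted b (fun v => v) false).foldl bStep ([], 0, 0)
           if st.2.2 ≠ 0 then st.1 ++ [st.2.2] else st.1) (fun v => v)).getD 0 := by
  have hperm : (PySem.List.sorted b (fun v => v) false).Perm b :=
    PySem.List.sorted_perm b (fun v => v) false
  have hcne : PySem.List.sorted b (fun v => v) false ≠ [] := by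
    intro h; exact hb ((PySem.List.sorted_eq_nil_iff b _ false).mp h)
  obtain ⟨y, c', hc⟩ := List.exists_cons_of_ne_nil hcne
  -- B's runs list is Rspec y 1 c'
  have hpair : (PySem.List.sorted b (fun v => v) false).Pairwise (· ≤ ·) := by
    have := PySem.List.sorted_pairwise b (fun v => v)
    simpa using this
  have hstep0 : bStep ([], 0, 0) y = ([], y, (1 : Int)) := by simp [bStep]
  have hruns : (let st := (PySem.List.sorted b (fun v => v) false).foldl bStep ([], 0, 0)
      if st.2.2 ≠ 0 then st.1 ++ [st.2.2] else st.1) = Rspec y 1 c' := by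
    rw [hc, List.foldl_cons, hstep0]
    have := foldl_bStep_spec c'.length c' le_rfl [] y 1 le_rfl
    simpa using this
  -- A's values list is the counts over the distinct elements
  have hvals : (b.foldl aStep PySem.Dict.empty).values
      = (PySem.Set.ofList b).map (fun v => ((b.count v : Nat) : Int)) := by
    rw [hist_eq_counter]
    show (PySem.Dict.counter b).items.map (·.2) = _
    rw [PySem.Dict.items_counter]
    simp [List.map_map, Function.comp_def]
  rw [hruns, hvals]
  rw [hc] at hpair
  obtain ⟨hM1, hM2⟩ := Rspec_mem c'.length c' le_rfl y hpair
  -- membership transfer through the permutation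
  have hmemc : ∀ v, v ∈ y :: c' ↔ v ∈ b := by
    intro v; rw [← hc]; exact hperm.mem_iff
  have hcnt : ∀ v : Int, (y :: c').count v = b.count v := by
    intro v; rw [← hc]; exact hperm.count_eq v
  apply maxD_eq_of_mutual
  · obtain ⟨z, b', rfl⟩ := List.exists_cons_of_ne_nil hb
    intro h
    have hz : z ∈ PySem.Set.ofList (z :: b') := (PySem.Set.mem_ofList _ z).mpr List.mem_cons_self
    rw [List.map_eq_nil_iff.mp h] at hz
    simp at hz
  · rw [Rspec]
    cases c'.dropWhile (· == y) <;> simp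
  · intro r hr
    rw [List.mem_map] at hr
    obtain ⟨v, hv, rfl⟩ := hr
    have hvb : v ∈ b := (PySem.Set.mem_ofList b v).mp hv
    have := hM2 v ((hmemc v).mpr hvb)
    rwa [hcnt v] at this
  · intro r hr
    obtain ⟨v, hv, rfl⟩ := hM1 r hr
    rw [List.mem_map]
    exact ⟨v, (PySem.Set.mem_ofList b v).mpr ((hmemc v).mp hv), by rw [hcnt v]⟩

-- ===== VERDICT (by name: the statement is the Claim_ definition above) =====
theorem minuteToWinIt_spec : Claim_equal_minuteToWinIt := by
  intro a k _hdom hpre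
  unfold Spec_minuteToWinIt minuteToWinIt minuteToWinIt_alt
  have hb : (PySem.List.enumerate a).map (fun p => p.2 - k * p.1) ≠ [] := by
    intro h
    apply hpre
    have := congrArg List.length h
    simp at this
    simpa using this
  simp only []
  rw [max_values_eq_max_runs _ hb]
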